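-- pv_equiv track=rewrite | github.com/Lozambet/brute_dict | main.py | generate_mix_passwords
-- ===== SOURCE A (Python) =====
-- import itertools
-- from typing import Iterable, List, Optional, Sequence, Set, Tuple
--
-- def generate_mix_passwords(
--     keywords: Sequence[str],
--     max_words: int,
--     min_len: int = 6,
--     max_len: int = 25,
-- ) -> List[str]:
--     """Generate 'minestrone' passwords by mixing given keywords.
--
--     - Uses permutations (words not repeated in a single password).
--     - Builds strings by concatenating 1..max_words words.
--     - Filters by length.
--     """
--     kws = [k for k in keywords if k]
--     results: Set[str] = set()
--     if not kws or max_words <= 0: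
--         return []
--
--     max_r = min(max_words, len(kws))
--     for r in range(1, max_r + 1):
--         for perm in itertools.permutations(kws, r):
--             s = "".join(perm)
--             if min_len <= len(s) <= max_len:
--                 results.add(s)
--     return sorted(results)
-- ===== SOURCE B (Python) =====
-- def generate_mix_passwords(keywords, max_words, min_len=6, max_len=25):
--     """Backtracking DFS over word permutations: abandon a branch as soon as
--     the running prefix exceeds max_len (extending only grows the string)."""
--     kws = [k for k in keywords if k]
--     if not kws or max_words <= 0:
--         return []
--     limit = min(max_words, len(kws))
--     out = set()
--
--     def dfs(fuel, prefix, remaining):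
--         if fuel == 0:
--             return
--         for i, w in enumerate(remaining):
--             s = prefix + w
--             if len(s) > max_len:
--                 continue
--             if len(s) >= min_len:
--                 out.add(s)
--             dfs(fuel - 1, s, remaining[:i] + remaining[i + 1:])
--
--     dfs(limit, "", kws)
--     return sorted(out)
-- ===== Notes on version B (the rewrite author's own statement) =====
-- stated objective: alternative
-- what changed: Replaced the per-r full enumeration of permutation tuples (materialize every r-permutation, join, then length-filter) by a backtracking DFS that extends a running string prefix word by word and abandons a branch as soon as the prefix exceeds max_len; worst-case cost is the same since the in-range output itself can be exponential.
import Mathlib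
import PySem

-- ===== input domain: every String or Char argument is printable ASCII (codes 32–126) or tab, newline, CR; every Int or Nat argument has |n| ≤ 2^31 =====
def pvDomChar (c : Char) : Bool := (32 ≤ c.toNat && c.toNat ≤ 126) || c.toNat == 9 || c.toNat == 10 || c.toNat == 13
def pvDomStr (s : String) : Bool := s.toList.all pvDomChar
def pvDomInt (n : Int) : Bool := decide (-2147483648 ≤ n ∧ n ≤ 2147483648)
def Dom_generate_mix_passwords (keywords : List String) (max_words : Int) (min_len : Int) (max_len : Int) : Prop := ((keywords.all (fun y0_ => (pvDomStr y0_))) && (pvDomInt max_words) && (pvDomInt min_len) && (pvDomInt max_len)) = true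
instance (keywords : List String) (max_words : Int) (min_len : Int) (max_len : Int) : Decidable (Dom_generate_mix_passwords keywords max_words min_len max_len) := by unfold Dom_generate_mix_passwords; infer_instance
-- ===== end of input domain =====

-- B replaces A's per-r full enumeration of permutation tuples by a backtracking DFS that
-- extends a running prefix and abandons a branch once it exceeds max_len (objective: alternative).


-- ===== PORT A =====
-- literal transliteration of A: for each r in 1..min(max_words,len(kws)), enumerate all
-- r-permutations, join each, length-filter into a set, then sort.
def generate_mix_passwords (keywords : List String) (max_words : Int) (min_len : Int) (max_len : Int) : List String :=
  let kws := keywords.filter (fun k => k ≠ "")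
  if kws = [] ∨ max_words ≤ 0 then []
  else
    let max_r : Int := min max_words (kws.length : Int)
    let results : PySem.Set String :=
      (PySem.List.pyRange 1 (max_r + 1)).foldl (fun res r =>
        (PySem.List.permutations kws r.toNat).foldl (fun res perm =>
          let s := PySem.Str.join "" perm
          if min_len ≤ PySem.Str.len s ∧ PySem.Str.len s ≤ max_len then PySem.Set.add res s
          else res) res)
        PySem.Set.empty
    PySem.List.sorted results (fun x => x)

-- ===== PORT B =====
-- literal transliteration of B's dfs(fuel, prefix, remaining): extend the prefix by each
-- remaining word, skip (prune) the branch when it exceeds max_len, record when long enough,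
-- recurse on the remaining words with one unit of fuel less.
def pvDfs (min_len max_len : Int) : Nat → List Char → List String → PySem.Set String → PySem.Set String
  | 0, _, _, out => out
  | fuel+1, pre, remaining, out =>
    (PySem.List.enumerate remaining).foldl (fun out iw =>
      let s := pre ++ iw.2.toList
      if max_len < (s.length : Int) then out
      else
        let out' := if min_len ≤ (s.length : Int) then PySem.Set.add out (String.ofList s) else out
        pvDfs min_len max_len fuel s (remaining.eraseIdx iw.1.toNat) out')
      out

def generate_mix_passwords_alt (keywords : List String) (max_words : Int) (min_len : Int) (max_len : Int) : List String :=
  let kws := keywords.filter (fun k => k ≠ "")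
  if kws = [] ∨ max_words ≤ 0 then []
  else
    let limit := (min max_words (kws.length : Int)).toNat
    PySem.List.sorted (pvDfs min_len max_len limit [] kws PySem.Set.empty) (fun x => x)

-- ===== PRECONDITION & SPEC =====
def Spec_generate_mix_passwords (keywords : List String) (max_words : Int) (min_len : Int) (max_len : Int) (out : List String) : Prop := out = generate_mix_passwords_alt keywords max_words min_len max_len
instance (keywords : List String) (max_words : Int) (min_len : Int) (max_len : Int) (out : List String) : Decidable (Spec_generate_mix_passwords keywords max_words min_len max_len out) := by unfold Spec_generate_mix_passwords; infer_instance

-- ===== CLAIM (what is proved, stated in full; the proofs are below) =====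
def Claim_equal_generate_mix_passwords : Prop := ∀ (keywords : List String) (max_words : Int) (min_len : Int) (max_len : Int), Dom_generate_mix_passwords keywords max_words min_len max_len → Spec_generate_mix_passwords keywords max_words min_len max_len (generate_mix_passwords keywords max_words min_len max_len)

-- ===== LEMMAS AND PROOFS =====

-- concatenation of the character lists of a permutation's words
def pvCJoin (p : List String) : List Char := (p.map String.toList).flatten

lemma pvChars_join_nil_sep : ∀ (l : List (List Char)), PySem.Chars.join [] l = l.flatten
  | [] => by simp [PySem.Chars.join_nil]
  | [a] => by simp [PySem.Chars.join_singleton]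
  | a :: b :: t => by
    rw [PySem.Chars.join_cons_cons]
    simp [pvChars_join_nil_sep (b :: t)]

lemma pvJoin_empty_sep (p : List String) :
    PySem.Str.join "" p = String.ofList (pvCJoin p) := by
  rw [← String.ofList_toList (s := PySem.Str.join "" p)]
  rw [PySem.Str.toList_join]
  simp [pvChars_join_nil_sep, pvCJoin]

lemma pvLen_join (p : List String) :
    PySem.Str.len (PySem.Str.join "" p) = ((pvCJoin p).length : Int) := by
  rw [pvJoin_empty_sep, PySem.Str.len_eq, String.toList_ofList]

-- membership in a fold whose step adds (at most) elements characterised by C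
lemma pvMem_foldl_iff {α : Type} (F : PySem.Set String → α → PySem.Set String)
    (C : α → String → Prop)
    (h : ∀ res r x, x ∈ F res r ↔ x ∈ res ∨ C r x) :
    ∀ (l : List α) (acc : PySem.Set String) (x : String),
      x ∈ l.foldl F acc ↔ x ∈ acc ∨ ∃ r ∈ l, C r x
  | [], acc, x => by simp
  | a :: l, acc, x => by
    simp only [List.foldl_cons, pvMem_foldl_iff F C h l (F acc a) x, h acc a x,
      List.mem_cons]
    constructor
    · rintro ((h1 | h1) | ⟨r, hr, hc⟩)
      · exact Or.inl h1
      · exact Or.inr ⟨a, Or.inl rfl, h1⟩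
      · exact Or.inr ⟨r, Or.inr hr, hc⟩
    · rintro (h1 | ⟨r, (rfl | hr), hc⟩)
      · exact Or.inl (Or.inl h1)
      · exact Or.inl (Or.inr hc)
      · exact Or.inr ⟨r, hr, hc⟩

lemma pvNodup_foldl {α : Type} (F : PySem.Set String → α → PySem.Set String)
    (h : ∀ res r, res.Nodup → (F res r).Nodup) :
    ∀ (l : List α) (acc : PySem.Set String), acc.Nodup → (l.foldl F acc).Nodup
  | [], _, ha => ha
  | a :: l, acc, ha => pvNodup_foldl F h l (F acc a) (h acc a ha)

lemma pvPermutations_succ {α : Type} (xs : List α) (r : Nat) :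
    PySem.List.permutations xs (r+1) =
      (List.range xs.length).flatMap (fun i =>
        match xs[i]? with
        | none => []
        | some x => (PySem.List.permutations (xs.eraseIdx i) r).map (fun p => x :: p)) := by
  simp only [PySem.List.permutations]
  rfl

lemma pvMem_permutations_succ {α : Type} (xs : List α) (r : Nat) (p : List α) :
    p ∈ PySem.List.permutations xs (r+1) ↔
      ∃ (k : Nat), ∃ (h : k < xs.length), ∃ q ∈ PySem.List.permutations (xs.eraseIdx k) r,
        p = xs[k] :: q := by
  rw [pvPermutations_succ]
  simp only [List.mem_flatMap, List.mem_range]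
  constructor
  · rintro ⟨i, hi, hp⟩
    rw [List.getElem?_eq_getElem hi] at hp
    simp only [List.mem_map] at hp
    obtain ⟨q, hq, rfl⟩ := hp
    exact ⟨i, hi, q, hq, rfl⟩
  · rintro ⟨k, hk, q, hq, rfl⟩
    refine ⟨k, hk, ?_⟩
    rw [List.getElem?_eq_getElem hk]
    simp only [List.mem_map]
    exact ⟨q, hq, rfl⟩

lemma pvNodup_pvDfs (minl maxl : Int) :
    ∀ (fuel : Nat) (pre : List Char) (rem : List String) (out : PySem.Set String),
      out.Nodup → (pvDfs minl maxl fuel pre rem out).Nodup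
  | 0, _, _, _, h => h
  | f+1, pre, rem, out, h => by
    simp only [pvDfs]
    refine pvNodup_foldl _ ?_ _ _ h
    intro res iw hres
    dsimp only
    split_ifs with h1 h2
    · exact hres
    · exact pvNodup_pvDfs minl maxl f _ _ _ (PySem.Set.nodup_add _ _ hres)
    · exact pvNodup_pvDfs minl maxl f _ _ _ hres

-- the set collected by the DFS: exactly the in-range joins of the 1..fuel-permutations
-- of the remaining words appended to the prefix (pruning loses nothing: a join within
-- max_len has every prefix within max_len)
lemma pvMem_pvDfs (minl maxl : Int) :
    ∀ (fuel : Nat) (pre : List Char) (rem : List String) (out : PySem.Set String) (x : String),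
      x ∈ pvDfs minl maxl fuel pre rem out ↔
        x ∈ out ∨ ∃ r : Nat, 1 ≤ r ∧ r ≤ fuel ∧ ∃ p ∈ PySem.List.permutations rem r,
          minl ≤ ((pre ++ pvCJoin p).length : Int) ∧ ((pre ++ pvCJoin p).length : Int) ≤ maxl ∧
          x = String.ofList (pre ++ pvCJoin p)
  | 0, pre, rem, out, x => by
    simp only [pvDfs]
    constructor
    · exact Or.inl
    · rintro (h | ⟨r, h1, h2, _⟩)
      · exact h
      · omega
  | f+1, pre, rem, out, x => by
    simp only [pvDfs]
    rw [pvMem_foldl_iff _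
      (C := fun iw x =>
        ¬ maxl < ((pre ++ iw.2.toList).length : Int) ∧
        ((minl ≤ ((pre ++ iw.2.toList).length : Int) ∧ x = String.ofList (pre ++ iw.2.toList)) ∨
         ∃ r : Nat, 1 ≤ r ∧ r ≤ f ∧
           ∃ p ∈ PySem.List.permutations (rem.eraseIdx iw.1.toNat) r,
             minl ≤ (((pre ++ iw.2.toList) ++ pvCJoin p).length : Int) ∧
             (((pre ++ iw.2.toList) ++ pvCJoin p).length : Int) ≤ maxl ∧
             x = String.ofList ((pre ++ iw.2.toList) ++ pvCJoin p)))
      ?_]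
    · refine or_congr Iff.rfl ?_
      constructor
      · rintro ⟨iw, hiw, hnp, hrest⟩
        rw [PySem.List.mem_enumerate_iff] at hiw
        obtain ⟨k, hk, rfl⟩ := hiw
        simp only [zero_add, Int.toNat_natCast] at hnp hrest
        rcases hrest with ⟨hmin, rfl⟩ | ⟨r, hr1, hr2, p, hp, hb1, hb2, rfl⟩
        · refine ⟨1, le_refl 1, by omega, [rem[k]], ?_, ?_, ?_, ?_⟩
          · rw [pvMem_permutations_succ]
            exact ⟨k, hk, [], by exact List.mem_singleton.mpr rfl, rfl⟩
          · simpa [pvCJoin] using hmin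
          · simpa [pvCJoin] using not_lt.mp hnp
          · simp [pvCJoin]
        · refine ⟨r+1, by omega, by omega, rem[k] :: p, ?_, ?_, ?_, ?_⟩
          · rw [pvMem_permutations_succ]
            exact ⟨k, hk, p, hp, rfl⟩
          · simpa [pvCJoin] using hb1
          · simpa [pvCJoin] using hb2
          · simp [pvCJoin]
      · rintro ⟨r, hr1, hr2, p, hp, hb1, hb2, rfl⟩
        obtain ⟨r', rfl⟩ : ∃ r', r = r' + 1 := ⟨r - 1, by omega⟩
        rw [pvMem_permutations_succ] at hp
        obtain ⟨k, hk, q, hq, rfl⟩ := hp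
        have hlen : (((pre ++ rem[k].toList).length : Int)) + ((pvCJoin q).length : Int)
            = ((pre ++ pvCJoin (rem[k] :: q)).length : Int) := by
          simp [pvCJoin]
          ring
        refine ⟨((k : Int), rem[k]), ?_, ?_, ?_⟩
        · rw [PySem.List.mem_enumerate_iff]
          exact ⟨k, hk, by simp⟩
        · have h2 := hb2
          simp only [← hlen] at h2
          dsimp only
          omega
        · simp only [Int.toNat_natCast]
          match r', hq with
          | 0, hq =>
            have hqnil : q = [] := by simpa using hq
            subst hqnil
            refine Or.inl ⟨?_, ?_⟩
            · simpa [pvCJoin] using hb1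
            · simp [pvCJoin]
          | r''+1, hq =>
            refine Or.inr ⟨r''+1, by omega, by omega, q, hq, ?_, ?_, ?_⟩
            · simpa [pvCJoin] using hb1
            · simpa [pvCJoin] using hb2
            · simp [pvCJoin]
    · intro res iw y
      dsimp only
      by_cases h1 : maxl < ((pre ++ iw.2.toList).length : Int)
      · rw [if_pos h1]
        constructor
        · exact Or.inl
        · rintro (hy | ⟨hc, -⟩)
          · exact hy
          · exact absurd h1 hc
      · rw [if_neg h1, pvMem_pvDfs minl maxl f]
        by_cases h2 : minl ≤ ((pre ++ iw.2.toList).length : Int)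
        · simp only [if_pos h2, PySem.Set.mem_add]
          constructor
          · rintro ((hy | hy) | ⟨r, hr1, hr2, hrest⟩)
            · exact Or.inl hy
            · exact Or.inr ⟨h1, Or.inl ⟨h2, hy⟩⟩
            · exact Or.inr ⟨h1, Or.inr ⟨r, hr1, hr2, hrest⟩⟩
          · rintro (hy | ⟨-, (⟨-, hy⟩ | ⟨r, hr1, hr2, hrest⟩)⟩)
            · exact Or.inl (Or.inl hy)
            · exact Or.inl (Or.inr hy)
            · exact Or.inr ⟨r, hr1, hr2, hrest⟩
        · simp only [if_neg h2]
          constructor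
          · rintro (hy | ⟨r, hr1, hr2, hrest⟩)
            · exact Or.inl hy
            · exact Or.inr ⟨h1, Or.inr ⟨r, hr1, hr2, hrest⟩⟩
          · rintro (hy | ⟨-, (⟨hc, -⟩ | ⟨r, hr1, hr2, hrest⟩)⟩)
            · exact Or.inl hy
            · exact absurd hc h2
            · exact Or.inr ⟨r, hr1, hr2, hrest⟩

-- the set collected by A's two nested loops
lemma pvMemA (kws : List String) (minl maxl maxr : Int) (x : String) :
    x ∈ (PySem.List.pyRange 1 (maxr + 1)).foldl (fun res r =>
        (PySem.List.permutations kws r.toNat).foldl (fun res perm =>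
          let s := PySem.Str.join "" perm
          if minl ≤ PySem.Str.len s ∧ PySem.Str.len s ≤ maxl then PySem.Set.add res s
          else res) res)
        PySem.Set.empty ↔
      ∃ rI ∈ PySem.List.pyRange 1 (maxr + 1), ∃ p ∈ PySem.List.permutations kws rI.toNat,
        (minl ≤ ((pvCJoin p).length : Int) ∧ ((pvCJoin p).length : Int) ≤ maxl) ∧
        x = String.ofList (pvCJoin p) := by
  rw [pvMem_foldl_iff _
    (C := fun r x => ∃ p ∈ PySem.List.permutations kws r.toNat,
      (minl ≤ ((pvCJoin p).length : Int) ∧ ((pvCJoin p).length : Int) ≤ maxl) ∧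
      x = String.ofList (pvCJoin p)) ?_]
  · simp
  · intro res r y
    rw [pvMem_foldl_iff _
      (C := fun p y => (minl ≤ ((pvCJoin p).length : Int) ∧ ((pvCJoin p).length : Int) ≤ maxl) ∧
        y = String.ofList (pvCJoin p)) ?_]
    intro res' p z
    dsimp only
    rw [pvLen_join, pvJoin_empty_sep]
    split_ifs with hc
    · rw [PySem.Set.mem_add]
      tauto
    · tauto

lemma pvNodupA (kws : List String) (minl maxl maxr : Int) :
    ((PySem.List.pyRange 1 (maxr + 1)).foldl (fun res r =>
        (PySem.List.permutations kws r.toNat).foldl (fun res perm =>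
          let s := PySem.Str.join "" perm
          if minl ≤ PySem.Str.len s ∧ PySem.Str.len s ≤ maxl then PySem.Set.add res s
          else res) res)
        PySem.Set.empty).Nodup := by
  refine pvNodup_foldl _ ?_ _ _ List.nodup_nil
  intro res r hres
  refine pvNodup_foldl _ ?_ _ _ hres
  intro res' p hres'
  dsimp only
  split_ifs with hc
  · exact PySem.Set.nodup_add _ _ hres'
  · exact hres'

-- ===== VERDICT (by name: the statement is the Claim_ definition above) =====
theorem generate_mix_passwords_spec : Claim_equal_generate_mix_passwords := by
  intro keywords mw mn mx _hdom
  unfold Spec_generate_mix_passwords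
  simp only [generate_mix_passwords, generate_mix_passwords_alt]
  by_cases hc : keywords.filter (fun k => k ≠ "") = [] ∨ mw ≤ 0
  · rw [if_pos hc, if_pos hc]
  · rw [if_neg hc, if_neg hc]
    push Not at hc
    obtain ⟨hne, hmw⟩ := hc
    set kws := keywords.filter (fun k => k ≠ "") with hkws
    have hlen : 1 ≤ (kws.length : Int) := by
      have h0 : 0 < kws.length := List.length_pos_of_ne_nil hne
      omega
    set maxr : Int := min mw (kws.length : Int) with hmaxr
    have hmaxr1 : 1 ≤ maxr := by omega
    set SA := (PySem.List.pyRange 1 (maxr + 1)).foldl (fun res r =>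
        (PySem.List.permutations kws r.toNat).foldl (fun res perm =>
          let s := PySem.Str.join "" perm
          if mn ≤ PySem.Str.len s ∧ PySem.Str.len s ≤ mx then PySem.Set.add res s
          else res) res)
        PySem.Set.empty with hSA
    set SB := pvDfs mn mx maxr.toNat [] kws PySem.Set.empty with hSB
    have hmem : ∀ x, x ∈ SB ↔ x ∈ SA := by
      intro x
      rw [hSA, hSB, pvMemA, pvMem_pvDfs]
      simp only [PySem.Set.empty, List.not_mem_nil, false_or, List.nil_append,
        PySem.List.mem_pyRange_one]
      constructor
      · rintro ⟨r, hr1, hr2, p, hp, hb1, hb2, rfl⟩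
        refine ⟨(r : Int), ⟨by omega, by omega⟩, p, ?_, ⟨hb1, hb2⟩, rfl⟩
        simpa using hp
      · rintro ⟨rI, ⟨hrI1, hrI2⟩, p, hp, ⟨hb1, hb2⟩, rfl⟩
        exact ⟨rI.toNat, by omega, by omega, p, hp, hb1, hb2, rfl⟩
    have hperm : SB.Perm SA :=
      (List.perm_ext_iff_of_nodup
        (pvNodup_pvDfs mn mx _ _ _ _ List.nodup_nil) (pvNodupA kws mn mx maxr)).mpr hmem
    have hys : (PySem.List.sorted SB (fun x => x)).Perm SA :=
      (PySem.List.sorted_perm SB (fun x => x) false).trans hperm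
    have hnodys : (PySem.List.sorted SB (fun x => x)).Nodup :=
      ((PySem.List.sorted_perm SB (fun x => x) false).nodup_iff).mpr
        (pvNodup_pvDfs mn mx _ _ _ _ List.nodup_nil)
    have hpl : (PySem.List.sorted SB (fun x => x)).Pairwise (fun a b => a < b) := by
      have h1 := PySem.List.sorted_pairwise SB (fun x => x)
      exact (h1.and hnodys).imp (fun {a b} h => lt_of_le_of_ne h.1 h.2)
    exact PySem.List.sorted_eq_of_perm_of_pairwise_lt SA _ (fun x => x) hys hpl
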